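-- pv_equiv track=rewrite | github.com/jugggao/log2csv | file_split.py | return_cut_list
-- ===== SOURCE A (Python) =====
-- def return_cut_list(lst):
--         rt = []
--         n = 0
--         for i in range(len(lst)-1):
--             if lst[i].split('.')[-1] != lst[i+1].split('.')[-1]:
--                 rt.append(lst[n:i+1])
--                 n = i+1
--         rt.append(lst[n:])
--         return rt
-- ===== SOURCE B (Python) =====
-- def return_cut_list(lst):
--     rt = []
--     current = []
--     prev = None
--     for x in lst:
--         s = x.split('.')[-1]
--         if current and s != prev:
--             rt.append(current)
--             current = []
--         current.append(x)
--         prev = s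
--     rt.append(current)
--     return rt
-- ===== Notes on version B (the rewrite author's own statement) =====
-- stated objective: simpler
-- what changed: Replaces index-boundary detection with slicing (range(len-1), lst[n:i+1]) by a single forward pass that accumulates the current run element-by-element and flushes it when the dot-suffix changes.
import Mathlib
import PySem

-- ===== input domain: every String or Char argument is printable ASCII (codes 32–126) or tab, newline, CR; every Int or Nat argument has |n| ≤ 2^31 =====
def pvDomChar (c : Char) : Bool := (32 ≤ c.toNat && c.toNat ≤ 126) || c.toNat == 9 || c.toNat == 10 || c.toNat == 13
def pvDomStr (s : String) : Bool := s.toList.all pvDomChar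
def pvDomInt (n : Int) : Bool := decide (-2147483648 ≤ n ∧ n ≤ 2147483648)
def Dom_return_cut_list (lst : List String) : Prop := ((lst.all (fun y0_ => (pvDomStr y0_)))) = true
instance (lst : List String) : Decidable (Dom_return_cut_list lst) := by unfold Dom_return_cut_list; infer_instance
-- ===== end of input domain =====

-- B replaces A's index-boundary detection with slicing by a single forward pass that
-- accumulates the current run element-by-element (objective: simpler).

-- shared helper: x.split('.')[-1]  (split? with sep "." is never none; the split is never empty,
-- so Python's [-1] never raises and pyGetD's default is never used)
def pvSuffix (x : String) : String :=
  PySem.List.pyGetD ((PySem.Str.split? x ".").getD []) (-1) ""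

-- ===== PORT A =====
def return_cut_list (lst : List String) : List (List String) :=
  let st :=
    (PySem.List.pyRange 0 ((lst.length : Int) - 1) 1).foldl
      (fun (st : List (List String) × Int) (i : Int) =>
        let (rt, n) := st
        if pvSuffix (PySem.List.pyGetD lst i "") ≠ pvSuffix (PySem.List.pyGetD lst (i + 1) "") then
          (rt ++ [PySem.List.slice lst (some n) (some (i + 1))], i + 1)
        else
          (rt, n))
      ([], 0)
  st.1 ++ [PySem.List.slice lst (some st.2) none]

-- ===== PORT B =====
def return_cut_list_alt (lst : List String) : List (List String) :=
  let st :=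
    lst.foldl
      (fun (st : List (List String) × List String × Option String) (x : String) =>
        let (rt, current, prev) := st
        let s := pvSuffix x
        let (rt, current) :=
          if current ≠ [] ∧ some s ≠ prev then (rt ++ [current], ([] : List String))
          else (rt, current)
        (rt, current ++ [x], some s))
      ([], [], none)
  st.1 ++ [st.2.1]

-- ===== PRECONDITION & SPEC =====
def Spec_return_cut_list (lst : List String) (out : List (List String)) : Prop := out = return_cut_list_alt lst
instance (lst : List String) (out : List (List String)) : Decidable (Spec_return_cut_list lst out) := by unfold Spec_return_cut_list; infer_instance

-- ===== CLAIM (what is proved, stated in full; the proofs are below) =====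
def Claim_equal_return_cut_list : Prop := ∀ (lst : List String), Dom_return_cut_list lst → Spec_return_cut_list lst (return_cut_list lst)

-- ===== LEMMAS AND PROOFS =====

-- A's loop body / B's loop body, named for the proofs
def pvStepA (lst : List String) (st : List (List String) × Int) (i : Int) :
    List (List String) × Int :=
  let (rt, n) := st
  if pvSuffix (PySem.List.pyGetD lst i "") ≠ pvSuffix (PySem.List.pyGetD lst (i + 1) "") then
    (rt ++ [PySem.List.slice lst (some n) (some (i + 1))], i + 1)
  else
    (rt, n)

def pvStepB (st : List (List String) × List String × Option String) (x : String) :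
    List (List String) × List String × Option String :=
  let (rt, current, prev) := st
  let s := pvSuffix x
  let (rt, current) :=
    if current ≠ [] ∧ some s ≠ prev then (rt ++ [current], ([] : List String))
    else (rt, current)
  (rt, current ++ [x], some s)

theorem pvA_eq_foldl (lst : List String) :
    return_cut_list lst =
      (((PySem.List.pyRange 0 ((lst.length : Int) - 1) 1).foldl (pvStepA lst) ([], 0)).1 ++
        [PySem.List.slice lst
          (some ((PySem.List.pyRange 0 ((lst.length : Int) - 1) 1).foldl (pvStepA lst) ([], 0)).2) none]) := by
  rfl

theorem pvB_eq_foldl (lst : List String) :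
    return_cut_list_alt lst =
      ((lst.foldl pvStepB ([], [], none)).1 ++ [(lst.foldl pvStepB ([], [], none)).2.1]) := by
  rfl

-- the loop invariant: after comparing pairs up to index j (A) / consuming j+1 elements (B),
-- B's state is (A's groups, lst[n:j+1], suffix of lst[j]) and 0 ≤ n ≤ j.
theorem pv_invariant (lst : List String) (j : Nat) (hj : j < lst.length) :
    ∃ m : Nat, m ≤ j ∧
      ((PySem.List.pyRange 0 (j : Int) 1).foldl (pvStepA lst) ([], 0)).2 = (m : Int) ∧
      (lst.take (j + 1)).foldl pvStepB ([], [], none) =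
        (((PySem.List.pyRange 0 (j : Int) 1).foldl (pvStepA lst) ([], 0)).1,
          (lst.drop m).take (j + 1 - m),
          some (pvSuffix lst[j])) := by
  induction j with
  | zero =>
      refine ⟨0, le_refl _, ?_, ?_⟩
      · simp
      · have h0 : lst.take 1 = [lst[0]] := by
          cases lst with
          | nil => simp at hj
          | cons a l => simp
        rw [h0]
        simp [pvStepB, List.take_one]
        cases lst with
        | nil => simp at hj
        | cons a l => simp
  | succ j ih =>
      have hj' : j < lst.length := Nat.lt_of_succ_lt hj
      obtain ⟨m, hm, hn, hB⟩ := ih hj'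
      have hrange : PySem.List.pyRange 0 ((j : Int) + 1) 1 =
          PySem.List.pyRange 0 (j : Int) 1 ++ [(j : Int)] :=
        PySem.List.pyRange_one_succ_right (by exact_mod_cast Nat.zero_le j)
      have htake : lst.take (j + 2) = lst.take (j + 1) ++ [lst[j + 1]] := by
        rw [List.take_add_one]
        simp [List.getElem?_eq_getElem hj]
      -- A's getD lookups are in-range getElem
      have hgj : PySem.List.pyGetD lst (j : Int) "" = lst[j] := by
        rw [PySem.List.pyGetD_natCast]
        exact List.getD_eq_getElem lst "" hj'
      have hgj1 : PySem.List.pyGetD lst ((j : Int) + 1) "" = lst[j + 1] := by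
        have : ((j : Int) + 1) = ((j + 1 : Nat) : Int) := by push_cast; ring
        rw [this, PySem.List.pyGetD_natCast]
        exact List.getD_eq_getElem lst "" hj
      set stA := (PySem.List.pyRange 0 (j : Int) 1).foldl (pvStepA lst) ([], 0) with hstA
      have hcurne : (lst.drop m).take (j + 1 - m) ≠ [] := by
        have : m < lst.length := lt_of_le_of_lt hm hj'
        intro hcontra
        have := congrArg List.length hcontra
        simp [List.length_take, List.length_drop] at this
        omega
      have hstep :
          (lst.take (j + 2)).foldl pvStepB ([], [], none) =
            pvStepB ((lst.take (j + 1)).foldl pvStepB ([], [], none)) lst[j + 1] := by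
        rw [htake, List.foldl_append]; rfl
      push_cast
      rw [hrange, List.foldl_append, List.foldl_cons, List.foldl_nil]
      have hdrop1 : (lst.drop (j + 1)).take 1 = [lst[j + 1]] := by
        have h6 : lst[j + 1] :: lst.drop (j + 1 + 1) = lst.drop (j + 1) :=
          List.getElem_cons_drop hj
        rw [← h6, List.take_succ_cons, List.take_zero]
      by_cases hne : pvSuffix lst[j] = pvSuffix lst[j + 1]
      · -- no cut: A keeps n, B extends the current run
        have hAstep : pvStepA lst stA (j : Int) = (stA.1, (m : Int)) := by
          simp [pvStepA, hgj, hgj1, hn, hne]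
        have hcond : ¬ ((lst.drop m).take (j + 1 - m) ≠ [] ∧
            some (pvSuffix lst[j + 1]) ≠ some (pvSuffix lst[j])) := by
          simp [hne]
        refine ⟨m, Nat.le_succ_of_le hm, ?_, ?_⟩
        · rw [← hstA, hAstep]
        · rw [← hstA, hstep, hB]
          simp only [pvStepB]
          rw [if_neg hcond, hAstep]
          refine Prod.ext rfl (Prod.ext ?_ rfl)
          show (lst.drop m).take (j + 1 - m) ++ [lst[j + 1]] = (lst.drop m).take (j + 1 + 1 - m)
          have hidx : (lst.drop m)[j + 1 - m]? = some lst[j + 1] := by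
            rw [List.getElem?_drop]
            have h3 : m + (j + 1 - m) = j + 1 := by omega
            rw [h3, List.getElem?_eq_getElem hj]
          have h2 : j + 1 + 1 - m = (j + 1 - m) + 1 := by omega
          rw [h2, List.take_add_one, hidx]
          rfl
      · -- cut: A appends lst[m:j+1] and sets n := j+1, B flushes the current run
        have hAstep : pvStepA lst stA (j : Int) =
            (stA.1 ++ [PySem.List.slice lst (some (m : Int)) (some ((j : Int) + 1))],
              (j : Int) + 1) := by
          simp [pvStepA, hgj, hgj1, hn, hne]
        have hcond : ((lst.drop m).take (j + 1 - m) ≠ [] ∧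
            some (pvSuffix lst[j + 1]) ≠ some (pvSuffix lst[j])) :=
          ⟨hcurne, by simpa using fun h => hne h.symm⟩
        have hslice : PySem.List.slice lst (some (m : Int)) (some ((j : Int) + 1)) =
            (lst.drop m).take (j + 1 - m) := by
          have h4 : ((j : Int) + 1) = ((j + 1 : Nat) : Int) := by push_cast; ring
          rw [h4, PySem.List.slice_natCast]
        refine ⟨j + 1, le_refl _, ?_, ?_⟩
        · rw [← hstA, hAstep]
          push_cast
          ring
        · rw [← hstA, hstep, hB]
          simp only [pvStepB]
          rw [if_pos hcond, hAstep]
          refine Prod.ext ?_ (Prod.ext ?_ rfl)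
          · show stA.1 ++ [(lst.drop m).take (j + 1 - m)] = stA.1 ++ [_]
            rw [hslice]
          · show [] ++ [lst[j + 1]] = (lst.drop (j + 1)).take (j + 1 + 1 - (j + 1))
            have h5 : j + 1 + 1 - (j + 1) = 1 := by omega
            rw [h5, hdrop1]
            rfl

-- ===== VERDICT (by name: the statement is the Claim_ definition above) =====
theorem return_cut_list_spec : Claim_equal_return_cut_list := by
  intro lst _
  show return_cut_list lst = return_cut_list_alt lst
  cases hl : lst with
  | nil => rfl
  | cons a l =>
    subst hl
    have hlen : 0 < (a :: l).length := by simp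
    have hj : (a :: l).length - 1 < (a :: l).length := by omega
    obtain ⟨m, hm, hn, hB⟩ := pv_invariant (a :: l) ((a :: l).length - 1) hj
    have htake : (a :: l).take ((a :: l).length - 1 + 1) = a :: l := by
      simp
    rw [pvA_eq_foldl, pvB_eq_foldl]
    have hcast : ((a :: l).length : Int) - 1 = (((a :: l).length - 1 : Nat) : Int) := by
      push_cast [Nat.cast_sub (by omega : 1 ≤ (a :: l).length)]; ring
    rw [hcast]
    rw [htake] at hB
    rw [hB, hn]
    have hslice : PySem.List.slice (a :: l) (some (m : Int)) none = (a :: l).drop m :=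
      PySem.List.slice_from_natCast _ _
    rw [hslice]
    congr 2
    have hlen2 : ((a :: l).drop m).length ≤ (a :: l).length - 1 + 1 - m := by
      simp [List.length_drop]
    exact (List.take_of_length_le hlen2).symm
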